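-- pv_equiv track=rewrite | github.com/Asori-han/public-data-leaks | scripts/dni_matcher.py | list_dni
-- ===== SOURCE A (Python) =====
-- def calculate_dni_letter(dni_number):
--     dni_letters = "TRWAGMYFPDXBNJZSQVHLCKE"
--     index = dni_number % 23
--     letter = dni_letters[index]
--     return letter
--
-- def list_dni(str, start = 0, dni_arr = None):
--     if dni_arr is None:
--         dni_arr = []
--     if start < len(str) and str[start] == '*':
--         for x in range(10):
--             list_dni(f"{str[:start]}{x}{str[(start+1):]}", start+1, dni_arr)
--     elif start == len(str):
--         dni = f"{str}{calculate_dni_letter(int(str))}"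
--         dni_arr.append(dni)
--     else:
--         list_dni(str, start+1, dni_arr)
--     return dni_arr
-- ===== SOURCE B (Python) =====
-- def calculate_dni_letter(dni_number):
--     dni_letters = "TRWAGMYFPDXBNJZSQVHLCKE"
--     index = dni_number % 23
--     letter = dni_letters[index]
--     return letter
--
-- def list_dni(str, start = 0, dni_arr = None):
--     if dni_arr is None:
--         dni_arr = []
--     stars = [i for i, c in enumerate(str) if i >= start and c == '*']
--     variants = [str]
--     for i in stars:
--         variants = [s[:i] + d + s[i+1:] for s in variants for d in "0123456789"]
--     for s in variants:
--         dni_arr.append(s + calculate_dni_letter(int(s)))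
--     return dni_arr
-- ===== Notes on version B (the rewrite author's own statement) =====
-- stated objective: alternative
-- what changed: Replaces A's character-by-character recursion (one call per cursor position, rebuilding the string at each wildcard) by a flat two-phase computation: collect the wildcard positions at or after start once, expand the list of candidate strings iteratively over those positions, then append each candidate plus its check letter.
import Mathlib
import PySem

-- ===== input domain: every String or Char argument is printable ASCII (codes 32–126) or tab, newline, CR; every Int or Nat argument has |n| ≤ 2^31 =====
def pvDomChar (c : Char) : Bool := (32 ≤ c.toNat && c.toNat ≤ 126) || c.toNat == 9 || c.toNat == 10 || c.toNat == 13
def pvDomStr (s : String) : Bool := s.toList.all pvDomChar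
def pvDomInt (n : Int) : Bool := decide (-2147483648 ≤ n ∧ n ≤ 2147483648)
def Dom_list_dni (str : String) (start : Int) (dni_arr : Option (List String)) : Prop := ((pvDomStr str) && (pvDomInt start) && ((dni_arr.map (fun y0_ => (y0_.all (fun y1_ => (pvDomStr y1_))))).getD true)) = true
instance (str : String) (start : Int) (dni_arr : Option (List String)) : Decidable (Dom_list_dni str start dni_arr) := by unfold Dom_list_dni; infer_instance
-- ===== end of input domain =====

-- B replaces A's per-character recursion by: collect the wildcard positions once, expand the
-- candidate list iteratively over them, then append each candidate plus its check letter
-- (objective: alternative).  Both Pythons mutate dni_arr in place by appending; the equivalence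
-- proved here is about the RETURN value (B performs the same appends as A).

-- ===== PORT A =====
-- shared helper calculate_dni_letter: the index dni_number % 23 is always in range 0..22
-- (PySem.Int.mod with positive divisor), so the total indexing form pyGetD is exact here.
def calculate_dni_letter (dni_number : Int) : Char :=
  PySem.List.pyGetD ("TRWAGMYFPDXBNJZSQVHLCKE".toList) (PySem.Int.mod dni_number 23) ' '

-- fuel makes the recursion total; it is ample for every input Pre_ admits (Python recurses
-- unboundedly when start > len(str): those inputs are outside Pre_)
def listDniGo (fuel : Nat) (s : List Char) (start : Int) (acc : List String) : List String :=
  match fuel with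
  | 0 => acc
  | Nat.succ fuel =>
    if start < (s.length : Int) ∧ PySem.List.pyGet? s start = some '*' then
      (PySem.List.pyRange 0 10 1).foldl
        (fun a x =>
          listDniGo fuel
            (PySem.List.slice s none (some start) ++ PySem.Int.toChars x ++
              PySem.List.slice s (some (start + 1)) none)
            (start + 1) a)
        acc
    else if start = (s.length : Int) then
      -- Python: dni_arr.append(str + letter(int(str))); int raises ValueError on none (outside Pre_)
      match PySem.Int.ofChars? s with
      | some n => acc ++ [String.mk (s ++ [calculate_dni_letter n])]
      | none => acc
    else
      listDniGo fuel s (start + 1) acc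

def list_dni (str : String) (start : Int) (dni_arr : Option (List String)) : List String :=
  listDniGo (2 * str.toList.length + start.natAbs + 2) str.toList start (dni_arr.getD [])

-- ===== PORT B =====
def list_dni_alt (str : String) (start : Int) (dni_arr : Option (List String)) : List String :=
  let cs := str.toList
  let stars : List Int :=
    ((PySem.List.enumerate cs 0).filter (fun p => decide (start ≤ p.1) && decide (p.2 = '*'))).map Prod.fst
  let variants : List (List Char) :=
    stars.foldl
      (fun vs i => vs.flatMap (fun s =>
        "0123456789".toList.map (fun d =>
          PySem.List.slice s none (some i) ++ [d] ++ PySem.List.slice s (some (i + 1)) none)))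
      [cs]
  variants.foldl
    (fun a s =>
      match PySem.Int.ofChars? s with
      | some n => a ++ [String.mk (s ++ [calculate_dni_letter n])]
      | none => a)
    (dni_arr.getD [])

-- ===== PRECONDITION & SPEC =====
-- the string with every '*' at position ≥ start replaced by '0' (valid as an int literal
-- exactly when every digit substitution is, since int() syntax does not depend on WHICH digit)
def pvSubst (cs : List Char) (start : Int) : List Char :=
  (PySem.List.enumerate cs 0).map (fun p => if start ≤ p.1 ∧ p.2 = '*' then '0' else p.2)

-- start is A's recursion cursor.  Pre_ admits 0 <= start <= len(str), and start < 0 whenever the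
-- |start| tail positions Python's negative indexing re-scans hold no '*' (there A provably just
-- walks the cursor up to 0).  Pre_ excludes: start > len(str), where A recurses unboundedly
-- (RecursionError); strings whose wildcard expansion is not a valid int literal, where A raises
-- ValueError; start < -len(str), where str[start] raises IndexError; and start < 0 with a '*'
-- among the re-scanned tail positions, where A's value comes from negative-index wraparound
-- (digit insertion on a trailing '*', tail-first enumeration order) — an artefact outside the
-- cursor's natural domain (see claim cites).
def Pre_list_dni (str : String) (start : Int) (dni_arr : Option (List String)) : Prop :=
  (0 ≤ start → start ≤ (str.toList.length : Int)) ∧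
  (start < 0 → -start ≤ (str.toList.length : Int) ∧
      ((str.toList.drop (str.toList.length - (-start).toNat)).all (fun c => c != '*')) = true) ∧
  (PySem.Int.ofChars? (pvSubst str.toList start)).isSome = true

instance (str : String) (start : Int) (dni_arr : Option (List String)) : Decidable (Pre_list_dni str start dni_arr) := by unfold Pre_list_dni; infer_instance

def pvWitness_list_dni : String × Int × Option (List String) := ("1*", 0, none)

def Spec_list_dni (str : String) (start : Int) (dni_arr : Option (List String)) (out : List String) : Prop := out = list_dni_alt str start dni_arr
instance (str : String) (start : Int) (dni_arr : Option (List String)) (out : List String) : Decidable (Spec_list_dni str start dni_arr out) := by unfold Spec_list_dni; infer_instance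

-- ===== CLAIM (what is proved, stated in full; the proofs are below) =====
def Claim_equal_list_dni : Prop := ∀ (str : String) (start : Int) (dni_arr : Option (List String)), Dom_list_dni str start dni_arr → Pre_list_dni str start dni_arr → Spec_list_dni str start dni_arr (list_dni str start dni_arr)

-- ===== LEMMAS AND PROOFS =====

-- the strings A's recursion from cursor i produces and appends (proof-side reference tree)
def Vexp (cs : List Char) (i : Nat) : List (List Char) :=
  if h : i < cs.length then
    if cs[i] = '*' then
      "0123456789".toList.flatMap (fun d => Vexp (cs.set i d) (i + 1))
    else Vexp cs (i + 1)
  else [cs]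
termination_by cs.length - i
decreasing_by all_goals ((try simp only [List.length_set]); omega)

def emitOne (s : List Char) : List String :=
  match PySem.Int.ofChars? s with
  | some n => [String.mk (s ++ [calculate_dni_letter n])]
  | none => []

-- star positions of cs at index ≥ i, ascending
def starsFrom (cs : List Char) (i : Nat) : List Nat :=
  if h : i < cs.length then
    (if cs[i] = '*' then [i] else []) ++ starsFrom cs (i + 1)
  else []
termination_by cs.length - i

-- B's one expansion step
def stepB (vs : List (List Char)) (j : Int) : List (List Char) :=
  vs.flatMap (fun s =>
    "0123456789".toList.map (fun d =>
      PySem.List.slice s none (some j) ++ [d] ++ PySem.List.slice s (some (j + 1)) none))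

lemma slice_set (s : List Char) (j : Nat) (d : Char) (h : j < s.length) :
    PySem.List.slice s none (some (j : Int)) ++ [d] ++ PySem.List.slice s (some ((j : Int) + 1)) none
      = s.set j d := by
  have h1 : ((j : Int) + 1) = ((j + 1 : Nat) : Int) := by push_cast; ring
  rw [PySem.List.slice_to_natCast, h1, PySem.List.slice_from_natCast,
    List.set_eq_take_cons_drop d h]
  simp

lemma foldl_stepB_append (L : List Int) (xs ys : List (List Char)) :
    L.foldl stepB (xs ++ ys) = L.foldl stepB xs ++ L.foldl stepB ys := by
  induction L generalizing xs ys with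
  | nil => rfl
  | cons j L ih => simp only [List.foldl_cons, stepB, List.flatMap_append, ih]

lemma foldl_stepB_map (L : List Int) (ds : List Char) (h : Char → List Char) :
    L.foldl stepB (ds.map (fun d => h d)) = ds.flatMap (fun d => L.foldl stepB [h d]) := by
  induction ds with
  | nil => induction L with
    | nil => rfl
    | cons j L ih => simpa [stepB] using ih
  | cons d ds ih =>
    have : (d :: ds).map (fun d => h d) = [h d] ++ ds.map (fun d => h d) := by simp
    rw [this, foldl_stepB_append, ih]; simp

lemma starsFrom_set (cs : List Char) (i : Nat) (d : Char) (k : Nat) (hik : i < k) :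
    starsFrom (cs.set i d) k = starsFrom cs k := by
  induction hn : cs.length - k generalizing k with
  | zero =>
    have h1 : ¬ k < (cs.set i d).length := by rw [List.length_set]; omega
    have h2 : ¬ k < cs.length := by omega
    rw [starsFrom, dif_neg h1, starsFrom, dif_neg h2]
  | succ m ih =>
    have h2 : k < cs.length := by omega
    have h1 : k < (cs.set i d).length := by rw [List.length_set]; omega
    have hget : (cs.set i d)[k]'h1 = cs[k]'h2 := by
      rw [List.getElem_set]; exact if_neg (by omega)
    conv_lhs => rw [starsFrom]
    conv_rhs => rw [starsFrom]
    rw [dif_pos h1, dif_pos h2, hget, ih (k + 1) (by omega) (by omega)]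

lemma vexp_eq_foldl (cs : List Char) (i : Nat) :
    Vexp cs i = ((starsFrom cs i).map Int.ofNat).foldl stepB [cs] := by
  induction hn : cs.length - i generalizing cs i with
  | zero =>
    have hge : ¬ i < cs.length := by omega
    rw [Vexp, starsFrom, dif_neg hge, dif_neg hge]; rfl
  | succ m ih =>
    have hlt : i < cs.length := by omega
    conv_lhs => rw [Vexp]
    conv_rhs => rw [starsFrom]
    rw [dif_pos hlt, dif_pos hlt]
    by_cases hstar : cs[i] = '*'
    · rw [if_pos hstar, if_pos hstar]
      have hstep : stepB [cs] (i : Int) = "0123456789".toList.map (fun d => cs.set i d) := by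
        simp only [stepB, List.flatMap_singleton]
        exact List.map_congr_left (fun d _ => slice_set cs i d hlt)
      have hbody : (fun d => Vexp (cs.set i d) (i + 1))
          = fun d => ((starsFrom cs (i + 1)).map Int.ofNat).foldl stepB [cs.set i d] := by
        funext d
        rw [ih (cs.set i d) (i + 1) (by rw [List.length_set]; omega),
          starsFrom_set cs i d (i + 1) (by omega)]
      rw [hbody]
      simp only [List.singleton_append, List.map_cons, List.foldl_cons]
      rw [show Int.ofNat i = ((i : Nat) : Int) from rfl, hstep, foldl_stepB_map]
    · rw [if_neg hstar, if_neg hstar]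
      simp only [List.nil_append]
      exact ih cs (i + 1) (by omega)

-- B's final loop appends emitOne of each variant
lemma foldl_emit (vs : List (List Char)) (acc : List String) :
    vs.foldl
      (fun a s =>
        match PySem.Int.ofChars? s with
        | some n => a ++ [String.mk (s ++ [calculate_dni_letter n])]
        | none => a) acc
      = acc ++ vs.flatMap emitOne := by
  induction vs generalizing acc with
  | nil => simp
  | cons s vs ih =>
    simp only [List.foldl_cons, List.flatMap_cons, ih, emitOne]
    cases PySem.Int.ofChars? s <;> simp

lemma toChars_len_one (x : Int) (h0 : 0 ≤ x) (h9 : x < 10) :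
    ∃ c, PySem.Int.toChars x = [c] := by
  interval_cases x
  · exact ⟨'0', by decide⟩
  · exact ⟨'1', by decide⟩
  · exact ⟨'2', by decide⟩
  · exact ⟨'3', by decide⟩
  · exact ⟨'4', by decide⟩
  · exact ⟨'5', by decide⟩
  · exact ⟨'6', by decide⟩
  · exact ⟨'7', by decide⟩
  · exact ⟨'8', by decide⟩
  · exact ⟨'9', by decide⟩

lemma subst_eq_set (cs : List Char) (i : Nat) (hlt : i < cs.length) (x : Int) (c : Char)
    (h : PySem.Int.toChars x = [c]) :
    cs.take i ++ PySem.Int.toChars x ++ cs.drop (i + 1) = cs.set i c := by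
  rw [h, List.set_eq_take_cons_drop c hlt]; simp

-- A's recursion from cursor i appends exactly the Vexp leaves, in order
lemma goA_eq (fuel : Nat) : ∀ (cs : List Char) (i : Nat) (acc : List String),
    i ≤ cs.length → cs.length + 1 ≤ i + fuel →
    listDniGo fuel cs (i : Int) acc = acc ++ (Vexp cs i).flatMap emitOne := by
  induction fuel with
  | zero => intro cs i acc h1 h2; omega
  | succ fuel ih =>
    intro cs i acc h1 h2
    by_cases hlt : i < cs.length
    · have hget : PySem.List.pyGet? cs (i : Int) = cs[i]? := by simp [pysem]
      by_cases hstar : cs[i] = '*'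
      · have hcond : ((i : Int) < (cs.length : Int) ∧ PySem.List.pyGet? cs (i : Int) = some '*') := by
          refine ⟨by exact_mod_cast hlt, ?_⟩
          rw [hget, List.getElem?_eq_getElem hlt, hstar]
        rw [listDniGo, if_pos hcond]
        have hsub : ∀ x : Int,
            PySem.List.slice cs none (some (i : Int)) ++ PySem.Int.toChars x ++
              PySem.List.slice cs (some ((i : Int) + 1)) none
            = cs.take i ++ PySem.Int.toChars x ++ cs.drop (i + 1) := by
          intro x
          rw [PySem.List.slice_to_natCast,
            show ((i : Int) + 1) = ((i + 1 : Nat) : Int) by push_cast; ring,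
            PySem.List.slice_from_natCast]
        have hcongr : ∀ (a : List String), ∀ x ∈ PySem.List.pyRange 0 10 1,
            listDniGo fuel
              (PySem.List.slice cs none (some (i : Int)) ++ PySem.Int.toChars x ++
                PySem.List.slice cs (some ((i : Int) + 1)) none) ((i : Int) + 1) a
            = a ++ (Vexp (cs.take i ++ PySem.Int.toChars x ++ cs.drop (i + 1)) (i + 1)).flatMap emitOne := by
          intro a x hx
          obtain ⟨hx0, hx9⟩ := PySem.List.mem_pyRange_one.mp hx
          obtain ⟨c, hc⟩ := toChars_len_one x hx0 hx9
          have hlen : (cs.take i ++ PySem.Int.toChars x ++ cs.drop (i + 1)).length = cs.length := by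
            rw [hc]; simp; omega
          rw [hsub x, show ((i : Int) + 1) = ((i + 1 : Nat) : Int) by push_cast; ring]
          exact ih _ (i + 1) a (by omega) (by omega)
        rw [PySem.List.foldl_congr_mem _ _ _ acc hcongr,
          PySem.List.foldl_append_eq_flatMap]
        congr 1
        conv_rhs => rw [Vexp]
        rw [dif_pos hlt, if_pos hstar]
        have hR : PySem.List.pyRange 0 10 1 = [0,1,2,3,4,5,6,7,8,9] := by decide
        have hD : "0123456789".toList = ['0','1','2','3','4','5','6','7','8','9'] := by decide
        have key : ∀ (x : Int) (c : Char), PySem.Int.toChars x = [c] →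
            (Vexp (cs.take i ++ PySem.Int.toChars x ++ cs.drop (i + 1)) (i + 1)).flatMap emitOne
            = (Vexp (cs.set i c) (i + 1)).flatMap emitOne := by
          intro x c hc; rw [subst_eq_set cs i hlt x c hc]
        rw [hR, hD]
        simp only [List.flatMap_cons, List.flatMap_nil, List.append_nil]
        rw [key 0 '0' (by decide), key 1 '1' (by decide), key 2 '2' (by decide),
          key 3 '3' (by decide), key 4 '4' (by decide), key 5 '5' (by decide),
          key 6 '6' (by decide), key 7 '7' (by decide), key 8 '8' (by decide),
          key 9 '9' (by decide)]
        simp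
      · have hcond : ¬ ((i : Int) < (cs.length : Int) ∧ PySem.List.pyGet? cs (i : Int) = some '*') := by
          rintro ⟨-, hc⟩
          rw [hget, List.getElem?_eq_getElem hlt] at hc
          exact hstar (by injection hc)
        have hne : ¬ ((i : Int) = (cs.length : Int)) := by
          intro h; omega
        rw [listDniGo, if_neg hcond, if_neg hne,
          show ((i : Int) + 1) = ((i + 1 : Nat) : Int) by push_cast; ring,
          ih cs (i + 1) acc (by omega) (by omega)]
        conv_rhs => rw [Vexp]
        rw [dif_pos hlt, if_neg hstar]
    · have hie : i = cs.length := by omega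
      subst hie
      have hcond : ¬ (((cs.length : Nat) : Int) < (cs.length : Int) ∧ PySem.List.pyGet? cs ((cs.length : Nat) : Int) = some '*') := by
        rintro ⟨h, -⟩; omega
      rw [listDniGo, if_neg hcond, if_pos rfl]
      conv_rhs => rw [Vexp]
      rw [dif_neg (by omega)]
      simp only [List.flatMap_cons, List.flatMap_nil, List.append_nil, emitOne]
      cases PySem.Int.ofChars? cs <;> simp

-- B's stars list is starsFrom (bridging enumerate+filter to the index recursion)
lemma stars_bridge : ∀ (t cs : List Char) (s : Int) (i : Nat), cs.drop i = t →
    ((PySem.List.enumerate t (i : Int)).filter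
        (fun p => decide (s ≤ p.1) && decide (p.2 = '*'))).map Prod.fst
      = (starsFrom cs (max i s.toNat)).map Int.ofNat := by
  intro t
  induction t with
  | nil =>
    intro cs s i hdrop
    have hlen : cs.length ≤ i := by
      by_contra h
      rw [List.drop_eq_getElem_cons (by omega)] at hdrop
      exact (List.cons_ne_nil _ _) hdrop
    rw [PySem.List.enumerate_nil, starsFrom, dif_neg (by omega)]
    simp
  | cons c t ihl =>
    intro cs s i hdrop
    have hlt : i < cs.length := by
      by_contra h
      rw [List.drop_eq_nil_of_le (by omega)] at hdrop
      exact (List.cons_ne_nil _ _) hdrop.symm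
    have hcons := List.drop_eq_getElem_cons hlt
    rw [hdrop] at hcons
    have hhead : cs[i] = c := by injection hcons with h1 h2; exact h1.symm
    have htail : cs.drop (i + 1) = t := by injection hcons with h1 h2; exact h2.symm
    rw [PySem.List.enumerate_cons,
      show ((i : Int) + 1) = ((i + 1 : Nat) : Int) by push_cast; ring]
    by_cases hi0 : s.toNat ≤ i
    · have hsle : s ≤ (i : Int) := by omega
      have hmax : max i s.toNat = i := by omega
      have hmax1 : max (i + 1) s.toNat = i + 1 := by omega
      rw [hmax]
      conv_rhs => rw [starsFrom]
      rw [dif_pos hlt]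
      by_cases hstar : c = '*'
      · rw [List.filter_cons_of_pos (by simp [hstar]; omega),
          if_pos (by rw [hhead]; exact hstar), List.map_cons,
          ihl cs s (i + 1) htail, hmax1]
        simp
      · rw [List.filter_cons_of_neg (by simp [hstar]),
          if_neg (by rw [hhead]; exact hstar),
          ihl cs s (i + 1) htail, hmax1]
        simp
    · have hmax : max i s.toNat = s.toNat := by omega
      have hmax1 : max (i + 1) s.toNat = s.toNat := by omega
      rw [List.filter_cons_of_neg (by simp; omega),
        ihl cs s (i + 1) htail, hmax1, hmax]

-- for a negative cursor over a '*'-free tail, A only walks the cursor up to 0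
lemma goA_negphase : ∀ (k : Nat) (fuel : Nat) (cs : List Char) (acc : List String),
    k ≤ cs.length →
    (∀ c ∈ cs.drop (cs.length - k), c ≠ '*') →
    listDniGo (fuel + k) cs (-(k : Int)) acc = listDniGo fuel cs 0 acc := by
  intro k
  induction k with
  | zero => intro fuel cs acc _ _; norm_num
  | succ k ih =>
    intro fuel cs acc hk hstar
    have hlt : cs.length - (k + 1) < cs.length := by omega
    have hdropeq : cs.drop (cs.length - (k + 1))
        = cs[cs.length - (k + 1)] :: cs.drop (cs.length - k) := by
      rw [List.drop_eq_getElem_cons hlt, show cs.length - (k + 1) + 1 = cs.length - k by omega]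
    have hget : PySem.List.pyGet? cs (-((k + 1 : Nat) : Int)) = some (cs[cs.length - (k + 1)]) := by
      rw [PySem.List.pyGet?_neg_natCast cs (k + 1) (by omega) (by omega),
        List.getElem?_eq_getElem hlt]
    have hcond : ¬ ((-((k + 1 : Nat) : Int)) < (cs.length : Int) ∧
        PySem.List.pyGet? cs (-((k + 1 : Nat) : Int)) = some '*') := by
      rintro ⟨-, hc⟩
      rw [hget] at hc
      exact hstar _ (hdropeq ▸ List.mem_cons_self) (by injection hc)
    have hne : ¬ ((-((k + 1 : Nat) : Int)) = (cs.length : Int)) := by omega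
    rw [show fuel + (k + 1) = (fuel + k) + 1 by omega, listDniGo, if_neg hcond, if_neg hne,
      show (-((k + 1 : Nat) : Int)) + 1 = -((k : Nat) : Int) by push_cast; ring,
      ih fuel cs acc (by omega)
        (fun c hc => hstar c (hdropeq ▸ List.mem_cons_of_mem _ hc))]

-- ===== VERDICT (by name: the statement is the Claim_ definition above) =====
theorem list_dni_spec : Claim_equal_list_dni := by
  intro str start dni_arr _ hpre
  obtain ⟨hnn, hneg, -⟩ := hpre
  unfold Spec_list_dni
  simp only [list_dni, list_dni_alt]
  have hA : listDniGo (2 * str.toList.length + start.natAbs + 2) str.toList start (dni_arr.getD [])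
      = dni_arr.getD [] ++ (Vexp str.toList start.toNat).flatMap emitOne := by
    by_cases h0 : 0 ≤ start
    · have hs : ((start.toNat : Nat) : Int) = start := Int.toNat_of_nonneg h0
      have hle' : start.toNat ≤ str.toList.length := by have := hnn h0; omega
      conv_lhs => rw [← hs]
      exact goA_eq _ str.toList start.toNat (dni_arr.getD []) hle' (by omega)
    · obtain ⟨hk, hall⟩ := hneg (by omega)
      set k := (-start).toNat with hkdef
      have hz : start.toNat = 0 := by omega
      have hw : ∀ c ∈ str.toList.drop (str.toList.length - k), c ≠ '*' := by
        intro c hc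
        have := List.all_eq_true.mp hall _ hc
        simpa using this
      have hfuel : 2 * str.toList.length + start.natAbs + 2
          = (2 * str.toList.length + 2) + k := by omega
      have hcur : start = -(k : Int) := by omega
      rw [hz, hfuel, hcur]
      rw [goA_negphase k _ str.toList (dni_arr.getD []) (by omega) hw]
      rw [show (0 : Int) = ((0 : Nat) : Int) by simp]
      exact goA_eq _ str.toList 0 (dni_arr.getD []) (by omega) (by omega)
  rw [hA]
  have hstars := stars_bridge str.toList str.toList start 0 (by simp)
  rw [show ((0 : Nat) : Int) = (0 : Int) by simp, show max 0 start.toNat = start.toNat by omega] at hstars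
  rw [show (fun (vs : List (List Char)) (i : Int) => vs.flatMap (fun s =>
        "0123456789".toList.map (fun d =>
          PySem.List.slice s none (some i) ++ [d] ++ PySem.List.slice s (some (i + 1)) none)))
      = stepB from rfl]
  rw [hstars, ← vexp_eq_foldl str.toList start.toNat, foldl_emit]
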